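-- pv_equiv track=rewrite | github.com/yakeen15/pyth-calc | calc.py | op_adjacent
-- ===== SOURCE A (Python) =====
-- def op_adjacent(string):
--     slist = list(string)
--     addops = ['+','-']
--     i = 0
--     while i < len(slist):
--         if slist[i] in addops and slist[i+1] in addops:
--             if slist[i]==slist[i+1]:
--                 slist[i] = '+'
--             else:
--                 slist[i] = '-'
--             del slist[i+1]
--             i = 0
--         i = i+1
--     new_string = ''.join(slist)
--     return new_string
-- ===== SOURCE B (Python) =====
-- def op_adjacent(string):
--     out = []
--     prev_op = False   # currently inside a run of '+'/'-'
--     neg = False       # parity of '-' in the current run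
--     for c in string:
--         if c in '+-':
--             neg = (neg != (c == '-')) if prev_op else (c == '-')
--             prev_op = True
--         else:
--             if prev_op:
--                 out.append('-' if neg else '+')
--                 prev_op = False
--             out.append(c)
--     if prev_op:
--         out.append('-' if neg else '+')
--     return ''.join(out)
-- ===== Notes on version B (the rewrite author's own statement) =====
-- stated objective: faster
-- what changed: Replaces A's while loop that rescans from the start after every pairwise merge (repeated list mutation with del and i reset) by a single left-to-right pass that tracks the '-'-parity of the current run of '+'/'-' operators and emits one sign per run.
-- intended difference: On strings whose first three characters are all '+'/'-', A returns the leading operator run only partially collapsed to two signs (its rescan restarts at index 1, never revisiting index 0, e.g. '+++1' -> '++1'), while B returns the run fully collapsed to its single parity sign ('+1'), which is the intended value of the collapse. — e.g. on op_adjacent("+++1"): A returns "++1", B returns "+1"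
import Mathlib
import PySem

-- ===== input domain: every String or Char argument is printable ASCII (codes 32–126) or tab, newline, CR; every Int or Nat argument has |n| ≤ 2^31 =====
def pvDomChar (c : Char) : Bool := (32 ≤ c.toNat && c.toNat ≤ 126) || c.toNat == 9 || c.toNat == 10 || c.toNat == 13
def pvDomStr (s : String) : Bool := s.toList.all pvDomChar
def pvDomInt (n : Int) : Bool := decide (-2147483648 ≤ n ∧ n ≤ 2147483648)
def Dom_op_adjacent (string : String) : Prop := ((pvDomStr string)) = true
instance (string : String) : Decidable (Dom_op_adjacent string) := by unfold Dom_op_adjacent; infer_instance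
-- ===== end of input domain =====

-- B replaces A's rescan-from-the-start while loop by one left-to-right pass that keeps the '-'-parity
-- of the current operator run; on the inputs where A leaves a partially collapsed leading run (D_ below)
-- B returns the fully collapsed string instead.

-- ===== PORT A =====
def pvAddops : List Char := ['+', '-']

-- the while loop of A over (slist, i); `slist[i+1]` out of range (Python's IndexError) is read as the
-- non-operator placeholder '?' here — exactly those inputs are excluded by Pre_op_adjacent
def pvAloop (l : List Char) (i : Nat) : List Char :=
  if h : i < l.length then
    if hp : l.getD i '?' ∈ pvAddops ∧ l.getD (i + 1) '?' ∈ pvAddops then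
      pvAloop ((l.set i (if l.getD i '?' = l.getD (i + 1) '?' then '+' else '-')).eraseIdx (i + 1)) (0 + 1)
    else
      pvAloop l (i + 1)
  else l
termination_by (l.length, l.length - i)
decreasing_by
  · apply Prod.Lex.left
    have h1 : i + 1 < l.length := by
      by_contra hge
      have hdef := List.getD_eq_default l '?' (show l.length ≤ i + 1 by omega)
      rw [hdef] at hp
      exact absurd hp.2 (by decide)
    rw [List.length_eraseIdx]
    simp only [List.length_set]
    rw [if_pos h1]
    omega
  · apply Prod.Lex.right
    omega

def op_adjacent (string : String) : String :=
  String.ofList (pvAloop string.toList 0)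

-- ===== PORT B =====
def pvSign (neg : Bool) : Char := if neg then '-' else '+'

-- the for loop of B over the state (out, prev_op, neg)
def pvBloop : List Char → List Char → Bool → Bool → List Char
  | [], out, prevOp, neg => if prevOp then out ++ [pvSign neg] else out
  | c :: cs, out, prevOp, neg =>
    if c = '+' ∨ c = '-' then
      pvBloop cs out true (if prevOp then neg != decide (c = '-') else decide (c = '-'))
    else
      pvBloop cs ((if prevOp then out ++ [pvSign neg] else out) ++ [c]) false neg

def op_adjacent_alt (string : String) : String :=
  String.ofList (pvBloop string.toList [] false false)

-- ===== PRECONDITION & SPEC =====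
-- Pre_ excludes exactly the inputs on which A raises IndexError: a string whose last character is '+'
-- or '-', except the two-character all-operator strings, on which A returns.
def Pre_op_adjacent (string : String) : Prop :=
  string.toList.getD (string.toList.length - 1) '?' ∈ pvAddops →
    (string.toList.length = 2 ∧ string.toList.getD 0 '?' ∈ pvAddops)
instance (string : String) : Decidable (Pre_op_adjacent string) := by
  unfold Pre_op_adjacent; infer_instance

def pvWitness_op_adjacent : String := "1+2"

-- On strings whose first three characters are all '+'/'-', A returns the leading operator run only
-- partially collapsed (two signs remain: its rescan restarts at index 1, never 0), B returns the run
-- fully collapsed to its single parity sign, which is the intended value.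
def D_op_adjacent (string : String) : Prop :=
  string.toList.getD 0 '?' ∈ pvAddops ∧ string.toList.getD 1 '?' ∈ pvAddops ∧
    string.toList.getD 2 '?' ∈ pvAddops
instance (string : String) : Decidable (D_op_adjacent string) := by
  unfold D_op_adjacent; infer_instance

def Spec_op_adjacent (string : String) (out : String) : Prop :=
  ¬ D_op_adjacent string → out = op_adjacent_alt string
instance (string : String) (out : String) : Decidable (Spec_op_adjacent string out) := by
  unfold Spec_op_adjacent; infer_instance

def pvDiffWitness_op_adjacent : String := "+++1"
def pvDiffWitnessOut_op_adjacent : String × String := ("++1", "+1")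

-- ===== CLAIM (what is proved, stated in full; the proofs are below) =====
def Claim_unchanged_op_adjacent : Prop := ∀ (string : String), Dom_op_adjacent string → Pre_op_adjacent string → Spec_op_adjacent string (op_adjacent string)
def Claim_changed_op_adjacent : Prop := Dom_op_adjacent (pvDiffWitness_op_adjacent) ∧ Pre_op_adjacent (pvDiffWitness_op_adjacent) ∧ D_op_adjacent (pvDiffWitness_op_adjacent) ∧ op_adjacent (pvDiffWitness_op_adjacent) = pvDiffWitnessOut_op_adjacent.1 ∧ op_adjacent_alt (pvDiffWitness_op_adjacent) = pvDiffWitnessOut_op_adjacent.2 ∧ pvDiffWitnessOut_op_adjacent.1 ≠ pvDiffWitnessOut_op_adjacent.2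
def Claim_exact_op_adjacent : Prop := ∀ (string : String), Dom_op_adjacent string → Pre_op_adjacent string → D_op_adjacent string → op_adjacent string ≠ op_adjacent_alt string

-- ===== LEMMAS AND PROOFS =====

-- the combined sign of two adjacent operators, as A computes it
def pvSig (a b : Char) : Char := if a = b then '+' else '-'

-- reference function: every maximal run of '+'/'-' collapsed pairwise from the left
def pvCollapse : List Char → List Char
  | [] => []
  | [a] => [a]
  | a :: b :: rest =>
    if a ∈ pvAddops ∧ b ∈ pvAddops then pvCollapse (pvSig a b :: rest)
    else a :: pvCollapse (b :: rest)
termination_by l => l.length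

theorem pvSig_mem (a b : Char) : pvSig a b ∈ pvAddops := by
  unfold pvSig; split <;> decide

theorem pvGetD_drop (l : List Char) (n m : Nat) (d : Char) :
    (l.drop n).getD m d = l.getD (n + m) d := by
  simp [List.getD]

theorem pvGetD_take (l : List Char) (n m : Nat) (d : Char) (h : m < n) :
    (l.take n).getD m d = l.getD m d := by
  simp [List.getD, h]

theorem pvCollapse_cons_notop (c : Char) (xs : List Char)
    (h : ¬(c ∈ pvAddops ∧ xs.getD 0 '?' ∈ pvAddops)) :
    pvCollapse (c :: xs) = c :: pvCollapse xs := by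
  cases xs with
  | nil => simp [pvCollapse]
  | cons b rest =>
    rw [pvCollapse]
    simp only [List.getD_cons_zero] at h
    rw [if_neg h]

theorem pvCollapse_append (seg rest : List Char)
    (h : ∀ j, j + 1 ≤ seg.length →
      ¬((seg ++ rest).getD j '?' ∈ pvAddops ∧ (seg ++ rest).getD (j + 1) '?' ∈ pvAddops)) :
    pvCollapse (seg ++ rest) = seg ++ pvCollapse rest := by
  induction seg with
  | nil => simp
  | cons s ss ih =>
    have h0 : ¬(s ∈ pvAddops ∧ (ss ++ rest).getD 0 '?' ∈ pvAddops) := by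
      have := h 0 (by simp)
      simpa using this
    have hrec : ∀ j, j + 1 ≤ ss.length →
        ¬((ss ++ rest).getD j '?' ∈ pvAddops ∧ (ss ++ rest).getD (j + 1) '?' ∈ pvAddops) := by
      intro j hj
      have := h (j + 1) (by simp; omega)
      simpa using this
    calc pvCollapse ((s :: ss) ++ rest) = s :: pvCollapse (ss ++ rest) :=
          pvCollapse_cons_notop _ _ h0
    _ = s :: (ss ++ pvCollapse rest) := by rw [ih hrec]
    _ = (s :: ss) ++ pvCollapse rest := by simp

theorem pvAloop_spec : ∀ (l : List Char) (i : Nat), 1 ≤ i →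
    (∀ j, 1 ≤ j → j < i → ¬(l.getD j '?' ∈ pvAddops ∧ l.getD (j + 1) '?' ∈ pvAddops)) →
    pvAloop l i = l.take i ++ pvCollapse (l.drop i) := by
  intro l i
  induction l, i using pvAloop.induct with
  | case1 l i h hp ih =>
    intro hi hnp
    simp only [dite_eq_ite] at ih
    obtain ⟨hc, hd⟩ := hp
    have hi1 : i + 1 < l.length := by
      by_contra hge
      have hdef := List.getD_eq_default l '?' (show l.length ≤ i + 1 by omega)
      rw [hdef] at hd
      exact absurd hd (by decide)
    set c' := (if l.getD i '?' = l.getD (i + 1) '?' then '+' else '-') with hc'def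
    have hltake : (l.take i).length = i := by simp; omega
    have herase : (l.set i c').eraseIdx (i + 1) = (l.take i) ++ (c' :: l.drop (i + 2)) := by
      rw [List.set_eq_take_cons_drop c' h]
      rw [show l.take i ++ c' :: l.drop (i + 1) = (l.take i ++ [c']) ++ l.drop (i + 1) by simp]
      rw [List.eraseIdx_append_of_length_le (by simp [hltake])]
      rw [List.drop_eq_getElem_cons hi1]
      simp [hltake]
    rw [pvAloop, dif_pos h, dif_pos ⟨hc, hd⟩]
    rw [ih (by norm_num) (fun j hj1 hj2 => absurd hj2 (by omega))]
    rw [herase]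
    have htake1 : ((l.take i) ++ (c' :: l.drop (i + 2))).take (0 + 1) = l.take 1 := by
      rw [List.take_append_of_le_length (by omega), List.take_take]
      congr 1
      omega
    have hdrop1 : ((l.take i) ++ (c' :: l.drop (i + 2))).drop (0 + 1)
        = (l.take i).drop 1 ++ (c' :: l.drop (i + 2)) := by
      rw [List.drop_append_of_le_length (by omega)]
    rw [htake1, hdrop1]
    have hseglen : ((l.take i).drop 1).length = i - 1 := by simp; omega
    have hidx : ∀ k, k < i - 1 →
        ((l.take i).drop 1 ++ (c' :: l.drop (i + 2))).getD k '?' = l.getD (k + 1) '?' := by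
      intro k hk
      rw [List.getD_append _ _ _ _ (by omega)]
      rw [pvGetD_drop, pvGetD_take _ _ _ _ (by omega), Nat.add_comm]
    have hbound : ((l.take i).drop 1 ++ (c' :: l.drop (i + 2))).getD (i - 1) '?' = c' := by
      rw [List.getD_append_right _ _ _ _ (by omega)]
      simp only [List.length_drop, List.length_take]
      rw [show i - 1 - (min i l.length - 1) = 0 by omega]
      simp
    rw [pvCollapse_append]
    · -- ((l.take i).drop 1) ++ pvCollapse (c' :: drop (i+2)) assembled back
      have h11 : List.take 1 (List.take i l) = List.take 1 l := by
        rw [List.take_take, Nat.min_eq_left hi]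
      have hsplit : l.take i = l.take 1 ++ (l.take i).drop 1 := by
        conv_lhs => rw [← List.take_append_drop 1 (l.take i)]
        rw [h11]
      have hdropi : l.drop i = l[i] :: l[i + 1] :: l.drop (i + 2) := by
        rw [List.drop_eq_getElem_cons h, List.drop_eq_getElem_cons hi1]
      have hcoll : pvCollapse (l.drop i) = pvCollapse (c' :: l.drop (i + 2)) := by
        rw [hdropi, pvCollapse]
        rw [if_pos ⟨by rw [← List.getD_eq_getElem l '?' h]; exact hc,
                    by rw [← List.getD_eq_getElem l '?' hi1]; exact hd⟩]
        congr 1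
        rw [hc'def]
        unfold pvSig
        rw [List.getD_eq_getElem l '?' h, List.getD_eq_getElem l '?' hi1]
      rw [hcoll]
      conv_rhs => rw [hsplit]
      rw [List.append_assoc]
    · intro j hj
      rw [hseglen] at hj
      intro hpair
      rcases Nat.lt_or_ge (j + 1) (i - 1) with hlt | hge
      · rw [hidx j (by omega), hidx (j + 1) hlt] at hpair
        exact hnp (j + 1) (by omega) (by omega) ⟨hpair.1, hpair.2⟩
      · have hj1 : j + 1 = i - 1 := by omega
        rw [hidx j (by omega), hj1, hbound] at hpair
        have hi2 : 2 ≤ i := by omega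
        have := hnp (i - 1) (by omega) (by omega)
        rw [show i - 1 + 1 = i by omega] at this
        exact this ⟨hpair.1, hc⟩
  | case2 l i h hp ih =>
    intro hi hnp
    rw [pvAloop, dif_pos h, dif_neg hp]
    rw [ih (by omega) (fun j hj1 hj2 => by
      rcases Nat.lt_or_ge j i with hj | hj
      · exact hnp j hj1 hj
      · have : j = i := by omega
        subst this
        exact hp)]
    rw [List.drop_eq_getElem_cons h]
    rw [pvCollapse_cons_notop l[i] _ (by
      rw [pvGetD_drop, ← List.getD_eq_getElem l '?' h]
      simpa using hp)]
    have htk : List.take (i + 1) l = List.take i l ++ [l[i]] := by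
      rw [List.take_add_one, List.getElem?_eq_getElem h]
      rfl
    rw [htk, List.append_assoc]
    rfl

  | case3 l i h =>
    intro _ _
    rw [pvAloop, dif_neg h]
    rw [List.take_of_length_le (by omega), List.drop_eq_nil_of_le (by omega)]
    simp [pvCollapse]

theorem pvAloop_zero_merge (a b : Char) (rest : List Char)
    (ha : a ∈ pvAddops) (hb : b ∈ pvAddops) :
    pvAloop (a :: b :: rest) 0 = pvSig a b :: pvCollapse rest := by
  rw [pvAloop, dif_pos (by simp), dif_pos (by simpa using ⟨ha, hb⟩)]
  have hset : ((a :: b :: rest).set 0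
      (if (a :: b :: rest).getD 0 '?' = (a :: b :: rest).getD 1 '?' then '+' else '-')).eraseIdx 1
      = pvSig a b :: rest := by
    simp [List.set, List.eraseIdx, pvSig]
  rw [hset, pvAloop_spec _ 1 (by norm_num) (fun j hj1 hj2 => absurd hj2 (by omega))]
  simp

theorem pvAloop_zero_eq_collapse (l : List Char)
    (hD : ¬(l.getD 0 '?' ∈ pvAddops ∧ l.getD 1 '?' ∈ pvAddops ∧ l.getD 2 '?' ∈ pvAddops)) :
    pvAloop l 0 = pvCollapse l := by
  match l with
  | [] => rw [pvAloop]; simp [pvCollapse]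
  | [a] =>
    rw [pvAloop, dif_pos (by simp),
      dif_neg (fun hx => absurd (show ('?' : Char) ∈ pvAddops by simpa using hx.2) (by decide))]
    rw [pvAloop_spec _ 1 (by norm_num) (fun j hj1 hj2 => absurd hj2 (by omega))]
    simp [pvCollapse]
  | a :: b :: rest =>
    by_cases hab : a ∈ pvAddops ∧ b ∈ pvAddops
    · have hr : rest.getD 0 '?' ∉ pvAddops := by
        intro hmem
        exact hD ⟨by simpa using hab.1, by simpa using hab.2, by simpa using hmem⟩
      rw [pvAloop_zero_merge a b rest hab.1 hab.2]
      rw [pvCollapse, if_pos hab, pvCollapse_cons_notop _ _ (fun hc => hr hc.2)]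
    · rw [pvAloop, dif_pos (by simp), dif_neg (by simpa using hab)]
      rw [pvAloop_spec _ 1 (by norm_num) (fun j hj1 hj2 => absurd hj2 (by omega))]
      rw [pvCollapse_cons_notop _ _ (by simpa using hab)]
      simp

theorem pvBloop_spec : ∀ (l out : List Char) (p n : Bool),
    pvBloop l out p n = out ++ pvCollapse (if p then pvSign n :: l else l) := by
  intro l
  induction l with
  | nil =>
    intro out p n
    cases p <;> simp [pvBloop, pvCollapse]
  | cons c cs ih =>
    intro out p n
    by_cases hc : c = '+' ∨ c = '-'
    · have hcm : c ∈ pvAddops := by rcases hc with h | h <;> subst h <;> decide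
      cases p with
      | false =>
        rw [pvBloop, if_pos hc]
        simp only [Bool.false_eq_true, if_false]
        rw [ih]
        have : pvSign (decide (c = '-')) = c := by
          rcases hc with h | h <;> subst h <;> decide
        simp [this]
      | true =>
        rw [pvBloop, if_pos hc]
        simp only [if_true]
        rw [ih]
        have hstep : pvCollapse (pvSign n :: c :: cs)
            = pvCollapse (pvSig (pvSign n) c :: cs) := by
          rw [pvCollapse, if_pos ⟨by cases n <;> decide, hcm⟩]
        have hsig : pvSig (pvSign n) c = pvSign (n != decide (c = '-')) := by
          rcases hc with h | h <;> subst h <;> cases n <;> decide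
        simp [hstep, hsig]
    · have hcm : c ∉ pvAddops := by
        intro hmem
        apply hc
        simpa [pvAddops] using hmem
      cases p with
      | false =>
        rw [pvBloop, if_neg hc]
        simp only [Bool.false_eq_true, if_false]
        rw [ih]
        rw [pvCollapse_cons_notop _ _ (fun hx => hcm hx.1)]
        simp
      | true =>
        rw [pvBloop, if_neg hc]
        simp only [if_true]
        rw [ih]
        have h1 : pvCollapse (pvSign n :: c :: cs) = pvSign n :: pvCollapse (c :: cs) :=
          pvCollapse_cons_notop _ _ (fun hx => hcm (by simpa using hx.2))
        rw [h1, pvCollapse_cons_notop _ _ (fun hx => hcm hx.1)]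
        simp

theorem pvCollapse_len_head (xs : List Char) : ∀ (x y : Char), x ∈ pvAddops → y ∈ pvAddops →
    (pvCollapse (x :: xs)).length = (pvCollapse (y :: xs)).length := by
  induction xs with
  | nil => intro x y _ _; simp [pvCollapse]
  | cons z zs ih =>
    intro x y hx hy
    by_cases hz : z ∈ pvAddops
    · rw [pvCollapse, if_pos ⟨hx, hz⟩]
      rw [show pvCollapse (y :: z :: zs) = pvCollapse (pvSig y z :: zs) by
        rw [pvCollapse, if_pos ⟨hy, hz⟩]]
      exact ih _ _ (pvSig_mem x z) (pvSig_mem y z)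
    · rw [pvCollapse_cons_notop x (z :: zs) (fun hx' => hz (by simpa using hx'.2)),
          pvCollapse_cons_notop y (z :: zs) (fun hy' => hz (by simpa using hy'.2))]
      simp

-- ===== VERDICT (by name: the statement is the Claim_ definition above) =====
theorem op_adjacent_spec : Claim_unchanged_op_adjacent := by
  intro s _ _ hD
  unfold op_adjacent op_adjacent_alt
  rw [pvBloop_spec]
  simp only [Bool.false_eq_true, if_false, List.nil_append]
  congr 1
  apply pvAloop_zero_eq_collapse
  intro hx
  exact hD ⟨hx.1, hx.2.1, hx.2.2⟩

theorem op_adjacent_changed : Claim_changed_op_adjacent := by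
  unfold Claim_changed_op_adjacent pvDiffWitness_op_adjacent pvDiffWitnessOut_op_adjacent
  refine ⟨by simp [Dom_op_adjacent, pvDomStr, pvDomChar],
    by simp [Pre_op_adjacent, pvAddops],
    by simp [D_op_adjacent, pvAddops], ?_, ?_, by simp⟩
  · unfold op_adjacent
    rw [show ("+++1" : String).toList = ['+', '+', '+', '1'] by simp]
    rw [pvAloop_zero_merge '+' '+' _ (by decide) (by decide)]
    rw [show pvCollapse ['+', '1'] = ['+', '1'] by simp [pvCollapse, pvAddops]]
    rfl
  · unfold op_adjacent_alt
    rw [show ("+++1" : String).toList = ['+', '+', '+', '1'] by simp]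
    rfl

theorem op_adjacent_tight : Claim_exact_op_adjacent := by
  intro s _ _ hD heq
  obtain ⟨h0, h1, h2⟩ := hD
  match hm : s.toList with
  | [] => rw [hm] at h0; exact absurd h0 (by simp [pvAddops])
  | [a] => rw [hm] at h1; exact absurd h1 (by simp [pvAddops])
  | [a, b] => rw [hm] at h2; exact absurd h2 (by simp [pvAddops])
  | a :: b :: c :: rest =>
    rw [hm] at h0 h1 h2
    simp only [List.getD_cons_zero, List.getD_cons_succ] at h0 h1 h2
    have hlists : pvAloop s.toList 0 = pvBloop s.toList [] false false := by
      have := congrArg String.toList heq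
      unfold op_adjacent op_adjacent_alt at this
      simpa [String.toList_ofList] using this
    rw [hm] at hlists
    rw [pvAloop_zero_merge a b _ h0 h1] at hlists
    rw [pvBloop_spec] at hlists
    simp only [Bool.false_eq_true, if_false, List.nil_append] at hlists
    rw [pvCollapse, if_pos ⟨h0, h1⟩] at hlists
    rw [pvCollapse, if_pos ⟨pvSig_mem a b, h2⟩] at hlists
    have hlen := congrArg List.length hlists
    simp only [List.length_cons] at hlen
    rw [pvCollapse_len_head rest _ _ (pvSig_mem _ _) h2] at hlen
    omega
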